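-- pv_equiv track=rewrite | github.com/7b7b7b/WorstTokenPrediction | worst_generator.py | update_run_state
-- ===== SOURCE A (Python) =====
-- def update_run_state(last_char: str, run_len: int, fragment: str) -> tuple[str, int]:
--     # 按生成后的可见字符更新“连续重复字符”状态。
--     # 空白字符会打断连续计数。
--     for ch in fragment:
--         if ch.isspace():
--             last_char = ""
--             run_len = 0
--             continue
--         if ch == last_char:
--             run_len += 1
--         else:
--             last_char = ch
--             run_len = 1
--     return last_char, run_len
-- ===== SOURCE B (Python) =====
-- def update_run_state(last_char: str, run_len: int, fragment: str) -> tuple[str, int]: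
--     # Tail-only recomputation: only the text after the last whitespace matters.
--     if not fragment:
--         return last_char, run_len
--     # t = number of trailing non-whitespace characters
--     t = 0
--     for ch in reversed(fragment):
--         if ch.isspace():
--             break
--         t += 1
--     if t == 0:                      # fragment ends with whitespace
--         return "", 0
--     c = fragment[-1]
--     # k = length of the trailing run of c, confined to the last t characters
--     k = 1
--     while k < t and fragment[-1 - k] == c:
--         k += 1
--     if t == len(fragment) and k == len(fragment) and last_char == c:
--         return c, run_len + k       # whole fragment continues the incoming run
--     return c, k
-- ===== Notes on version B (the rewrite author's own statement) =====
-- stated objective: alternative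
-- what changed: A folds over every character of the fragment updating (last_char, run_len) step by step; B scans only from the end, taking the suffix after the last whitespace and computing the trailing run directly, continuing the incoming run only when the whole fragment is one unbroken run of last_char.
import Mathlib
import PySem

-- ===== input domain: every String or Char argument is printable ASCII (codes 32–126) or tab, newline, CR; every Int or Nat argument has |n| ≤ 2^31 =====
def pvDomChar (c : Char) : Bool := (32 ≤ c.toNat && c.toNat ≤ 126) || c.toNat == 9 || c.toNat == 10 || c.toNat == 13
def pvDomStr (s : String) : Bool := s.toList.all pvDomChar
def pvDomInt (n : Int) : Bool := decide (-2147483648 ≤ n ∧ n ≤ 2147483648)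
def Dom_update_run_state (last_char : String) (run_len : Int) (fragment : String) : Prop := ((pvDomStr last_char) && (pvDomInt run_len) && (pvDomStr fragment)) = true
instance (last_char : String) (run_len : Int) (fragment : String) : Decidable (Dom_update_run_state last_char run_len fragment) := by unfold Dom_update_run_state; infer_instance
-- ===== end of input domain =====

-- B replaces A's full left-to-right scan by a tail-only analysis (suffix after the last
-- whitespace determines the result) — an alternative decomposition of the same state update.


-- ===== PORT A =====
-- A's loop body: whitespace resets the state, a repeat of last_char increments, anything else restarts at 1.
def pvStepA (st : String × Int) (ch : Char) : String × Int :=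
  if PySem.Chars.isspace ch then ("", 0)
  else if String.ofList [ch] == st.1 then (st.1, st.2 + 1)
  else (String.ofList [ch], 1)

def update_run_state (last_char : String) (run_len : Int) (fragment : String) : String × Int :=
  fragment.toList.foldl pvStepA (last_char, run_len)

-- ===== PORT B =====
-- 'for ch in reversed(fragment): if ch.isspace(): break; t += 1' — count of leading
-- non-whitespace chars of the REVERSED fragment (= trailing non-whitespace of fragment).
def pvTns : List Char → Nat
  | [] => 0
  | c :: r => if PySem.Chars.isspace c then 0 else pvTns r + 1

-- 'while k < t and fragment[-1-k] == c: k += 1' — run of c continuing backwards, at most b more steps.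
def pvRunb (c : Char) : List Char → Nat → Nat
  | _, 0 => 0
  | [], _ => 0
  | x :: xs, b + 1 => if x = c then pvRunb c xs b + 1 else 0

-- B's body, on the reversed character list of fragment.
def pvAltR (last_char : String) (run_len : Int) (r : List Char) : String × Int :=
  match r with
  | [] => (last_char, run_len)                        -- 'if not fragment'
  | c :: rest =>
    let t := pvTns (c :: rest)
    if t = 0 then ("", 0)                             -- fragment ends with whitespace
    else
      let k := 1 + pvRunb c rest (pvTns rest)
      if t = r.length ∧ k = r.length ∧ last_char = String.ofList [c]
      then (String.ofList [c], run_len + (k : Int))   -- whole fragment continues the incoming run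
      else (String.ofList [c], (k : Int))

def update_run_state_alt (last_char : String) (run_len : Int) (fragment : String) : String × Int :=
  pvAltR last_char run_len fragment.toList.reverse

-- ===== PRECONDITION & SPEC =====
def Spec_update_run_state (last_char : String) (run_len : Int) (fragment : String) (out : String × Int) : Prop := out = update_run_state_alt last_char run_len fragment
instance (last_char : String) (run_len : Int) (fragment : String) (out : String × Int) : Decidable (Spec_update_run_state last_char run_len fragment out) := by unfold Spec_update_run_state; infer_instance

-- ===== CLAIM (what is proved, stated in full; the proofs are below) =====
def Claim_equal_update_run_state : Prop := ∀ (last_char : String) (run_len : Int) (fragment : String), Dom_update_run_state last_char run_len fragment → Spec_update_run_state last_char run_len fragment (update_run_state last_char run_len fragment)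

-- ===== LEMMAS AND PROOFS =====

-- On a non-whitespace-ending fragment, B's first component is that last character.
theorem pvAltR_fst (lc : String) (rl : Int) (d : Char) (rest : List Char)
    (hd : ¬ PySem.Chars.isspace d = true) :
    (pvAltR lc rl (d :: rest)).1 = String.ofList [d] := by
  simp only [pvAltR, pvTns, hd, if_false, Bool.false_eq_true]
  split_ifs <;> simp_all

-- Key step: appending one character on the right of the fragment is one step of A's loop on B's result.
theorem pvAltR_cons (lc : String) (rl : Int) (c : Char) (r : List Char) :
    pvAltR lc rl (c :: r) = pvStepA (pvAltR lc rl r) c := by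
  by_cases hs : PySem.Chars.isspace c = true
  · simp [pvAltR, pvStepA, pvTns, hs]
  · match r with
    | [] =>
        by_cases hlc : lc = String.ofList [c]
        · subst hlc
          simp [pvAltR, pvStepA, pvTns, pvRunb, hs]
        · simp [pvAltR, pvStepA, pvTns, pvRunb, hs, hlc, Ne.symm hlc]
    | d :: rest =>
        by_cases hd : PySem.Chars.isspace d = true
        · have hne : String.ofList [c] ≠ "" := by
            intro h
            have := congrArg String.toList h
            simp at this
          simp [pvAltR, pvStepA, pvTns, pvRunb, hs, hd, hne]
        · by_cases hcd : c = d
          · subst hcd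
            have h2 : pvRunb c (c :: rest) (pvTns rest + 1) = pvRunb c rest (pvTns rest) + 1 := by
              simp [pvRunb]
            have hiff : (pvTns rest + 1 + 1 = rest.length + 1 + 1 ∧
                1 + (pvRunb c rest (pvTns rest) + 1) = rest.length + 1 + 1 ∧ lc = String.ofList [c]) ↔
                (pvTns rest + 1 = rest.length + 1 ∧
                 1 + pvRunb c rest (pvTns rest) = rest.length + 1 ∧ lc = String.ofList [c]) := by
              constructor <;> rintro ⟨a, b, cc⟩ <;> exact ⟨by omega, by omega, cc⟩
            simp only [pvAltR, pvStepA, pvTns, hs, if_false, Bool.false_eq_true,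
              List.length_cons, h2]
            have h0 : ¬ (pvTns rest + 1 + 1 = 0) := by omega
            have h0' : ¬ (pvTns rest + 1 = 0) := by omega
            rw [if_neg h0, if_neg h0', if_congr hiff rfl rfl]
            by_cases hcond : (pvTns rest + 1 = rest.length + 1 ∧
                1 + pvRunb c rest (pvTns rest) = rest.length + 1 ∧ lc = String.ofList [c])
            · rw [if_pos hcond, if_pos hcond]
              simp only [beq_self_eq_true, if_true, Prod.mk.injEq, true_and]
              push_cast
              ring
            · rw [if_neg hcond, if_neg hcond]
              simp only [beq_self_eq_true, if_true, Prod.mk.injEq, true_and]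
              push_cast
              ring
          · have hne : ¬ (String.ofList [c] = String.ofList [d]) := by
              intro h
              have := congrArg String.toList h
              simp at this
              exact hcd this
            have hfst := pvAltR_fst lc rl d rest hd
            have hrb : pvRunb c (d :: rest) (pvTns rest + 1) = 0 := by
              simp [pvRunb]
              intro h; exact absurd h.symm hcd
            simp only [pvStepA, hs, if_false, Bool.false_eq_true, hfst, beq_iff_eq, hne]
            simp [pvAltR, pvTns, hs, hd, hrb]

-- A's whole fold equals B's tail analysis, by induction on the fragment from the right.
theorem pvFoldl_eq_altR (lc : String) (rl : Int) (l : List Char) :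
    l.foldl pvStepA (lc, rl) = pvAltR lc rl l.reverse := by
  induction l using List.reverseRecOn with
  | nil => simp [pvAltR]
  | append_singleton l c ih =>
      rw [List.foldl_append, List.reverse_append]
      simp only [List.foldl_cons, List.foldl_nil, List.reverse_singleton, List.singleton_append]
      rw [ih, pvAltR_cons]

-- ===== VERDICT (by name: the statement is the Claim_ definition above) =====
theorem update_run_state_spec : Claim_equal_update_run_state := by
  intro lc rl f _
  unfold Spec_update_run_state update_run_state update_run_state_alt
  exact pvFoldl_eq_altR lc rl f.toList
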